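-- pv_equiv track=rewrite | github.com/cloveq6/cs61A | lab/lab04/lab04_draft.py | add_chars_draft
-- ===== SOURCE A (Python) =====
-- def add_chars_draft(w1, w2):
--     """
--     Return a string containing the characters you need to add to w1 to get w2.
--
--     You may assume that w1 is a subsequence of w2.
--
--     >>> add_chars("owl", "howl")
--     'h'
--     >>> add_chars("want", "wanton")
--     'on'
--     >>> add_chars("rat", "radiate")
--     'diae'
--     >>> add_chars("a", "prepare")
--     'prepre'
--     >>> add_chars("resin", "recursion")
--     'curo'
--     >>> add_chars("fin", "effusion")
--     'efuso'
--     >>> add_chars("coy", "cacophony")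
--     'acphon'
--     >>> from construct_check import check
--     >>> # ban iteration and sets
--     >>> check(LAB_SOURCE_FILE, 'add_chars',
--     ...       ['For', 'While', 'Set', 'SetComp']) # Must use recursion
--     True
--     """
--     "*** YOUR CODE HERE ***"
--     if len(w1) == 0 : return w2
--     if w1[0] == w2[0]:
--         sub_w1 = w1[1:]
--         sub_w2 = w2[1:]
--         return add_chars_draft(sub_w1, sub_w2)
--     return w2[0] + add_chars_draft(w1, w2[1:])
-- ===== SOURCE B (Python) =====
-- def add_chars_draft(w1, w2):
--     it = iter(w1)
--     nxt = next(it, None)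
--     out = []
--     for c in w2:
--         if c == nxt:
--             nxt = next(it, None)
--         else:
--             out.append(c)
--     return ''.join(out)
-- ===== Notes on version B (the rewrite author's own statement) =====
-- stated objective: faster
-- what changed: Replaced the character-by-character recursion (each step slicing both strings, which copies) by a single iterative pass over w2 with an iterator/pointer into w1, collecting non-matching characters into a list joined once.
import Mathlib
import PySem

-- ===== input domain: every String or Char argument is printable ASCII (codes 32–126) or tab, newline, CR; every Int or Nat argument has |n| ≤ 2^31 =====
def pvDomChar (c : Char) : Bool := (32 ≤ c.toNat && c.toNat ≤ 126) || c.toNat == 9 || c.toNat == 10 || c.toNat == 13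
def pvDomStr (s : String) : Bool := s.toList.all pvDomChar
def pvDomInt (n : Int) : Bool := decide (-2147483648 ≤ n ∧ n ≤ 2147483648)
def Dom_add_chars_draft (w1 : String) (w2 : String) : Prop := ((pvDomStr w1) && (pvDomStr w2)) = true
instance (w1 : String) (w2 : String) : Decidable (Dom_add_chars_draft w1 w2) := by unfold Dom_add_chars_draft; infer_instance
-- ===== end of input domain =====

-- B replaces A's slicing recursion by one iterative pass over w2 with a pointer into w1 (faster: O(n) vs A's O(n^2) slicing).

-- ===== PORT A =====
-- A's recursion, on the character lists; `[]` in the (w1 ≠ "", w2 = "") case marks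
-- where Python raises IndexError on w2[0] — excluded by Pre_add_chars_draft.
def addCharsRecA : List Char → List Char → List Char
  | [], w2 => w2
  | _ :: _, [] => []
  | c1 :: t1, c2 :: t2 =>
    if c1 == c2 then addCharsRecA t1 t2
    else c2 :: addCharsRecA (c1 :: t1) t2

def add_chars_draft (w1 : String) (w2 : String) : String :=
  String.mk (addCharsRecA w1.toList w2.toList)

-- ===== PORT B =====
-- one fold step: `rest` is the not-yet-matched suffix of w1 (head = Python's `nxt`,
-- `[]` = None), `out` the collected extra characters.
def addCharsStepB : (List Char × List Char) → Char → (List Char × List Char)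
  | (r :: rs, out), c => if c == r then (rs, out) else (r :: rs, out ++ [c])
  | ([], out), c => ([], out ++ [c])

def add_chars_draft_alt (w1 : String) (w2 : String) : String :=
  String.mk (w2.toList.foldl addCharsStepB (w1.toList, [])).2

-- ===== PRECONDITION & SPEC =====
-- Pre_: w1 must be a subsequence of w2 (the docstring's stated assumption);
-- otherwise A's recursion reaches w2 = "" with w1 ≠ "" and w2[0] raises IndexError.
def Pre_add_chars_draft (w1 : String) (w2 : String) : Prop :=
  w1.toList.Sublist w2.toList
instance (w1 : String) (w2 : String) : Decidable (Pre_add_chars_draft w1 w2) := by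
  unfold Pre_add_chars_draft; infer_instance

def pvWitness_add_chars_draft : String × String := ("owl", "howl")

def Spec_add_chars_draft (w1 : String) (w2 : String) (out : String) : Prop := out = add_chars_draft_alt w1 w2
instance (w1 : String) (w2 : String) (out : String) : Decidable (Spec_add_chars_draft w1 w2 out) := by unfold Spec_add_chars_draft; infer_instance

-- ===== CLAIM (what is proved, stated in full; the proofs are below) =====
def Claim_equal_add_chars_draft : Prop := ∀ (w1 : String) (w2 : String), Dom_add_chars_draft w1 w2 → Pre_add_chars_draft w1 w2 → Spec_add_chars_draft w1 w2 (add_chars_draft w1 w2)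

-- ===== LEMMAS AND PROOFS =====

-- the fold's accumulator factors out
theorem foldl_stepB_acc (t : List Char) : ∀ (rest out : List Char),
    t.foldl addCharsStepB (rest, out)
      = ((t.foldl addCharsStepB (rest, [])).1,
         out ++ (t.foldl addCharsStepB (rest, [])).2) := by
  induction t with
  | nil => intro rest out; simp [List.foldl]
  | cons c t ih =>
    intro rest out
    have hstep : ∀ o : List Char, addCharsStepB (rest, o) c
        = ((addCharsStepB (rest, []) c).1, o ++ (addCharsStepB (rest, []) c).2) := by
      intro o
      cases rest with
      | nil => simp [addCharsStepB]
      | cons r rs => by_cases h : (c == r) = true <;> simp [addCharsStepB, h]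
    simp only [List.foldl]
    rw [hstep out, hstep []]
    dsimp only
    simp only [List.nil_append]
    rw [ih (addCharsStepB (rest, []) c).1 (out ++ (addCharsStepB (rest, []) c).2),
        ih (addCharsStepB (rest, []) c).1 ((addCharsStepB (rest, []) c).2)]
    simp

-- with w1 exhausted, the fold appends all of w2
theorem foldl_stepB_nil (t : List Char) : ∀ (out : List Char),
    t.foldl addCharsStepB ([], out) = ([], out ++ t) := by
  induction t with
  | nil => intro out; simp [List.foldl]
  | cons c t ih => intro out; simp [List.foldl, addCharsStepB, ih]

theorem recA_eq_fold (w2 : List Char) : ∀ (w1 : List Char), w1.Sublist w2 →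
    addCharsRecA w1 w2 = (w2.foldl addCharsStepB (w1, [])).2 := by
  induction w2 with
  | nil =>
    intro w1 h
    simp only [List.sublist_nil] at h
    subst h
    simp [addCharsRecA, List.foldl]
  | cons c t ih =>
    intro w1 h
    cases w1 with
    | nil =>
      simp [addCharsRecA, List.foldl, addCharsStepB, foldl_stepB_nil]
    | cons a t1 =>
      by_cases hac : (a == c) = true
      · have hae : a = c := by simpa using hac
        have ht1 : t1.Sublist t := by
          cases h with
          | cons _ h' => exact (List.sublist_cons_self a t1).trans h'
          | cons₂ _ h' => exact h'
        have hca : (c == a) = true := by simp [hae]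
        simp only [addCharsRecA, hac, if_pos, List.foldl, addCharsStepB, hca]
        exact ih t1 ht1
      · have hne : a ≠ c := fun he => hac (by simp [he])
        have hw1 : (a :: t1).Sublist t := by
          cases h with
          | cons _ h' => exact h'
          | cons₂ _ h' => exact absurd rfl hne
        have hca : (c == a) = false := by
          simp only [beq_eq_false_iff_ne]; exact fun he => hne he.symm
        simp only [addCharsRecA, hac, if_neg, List.foldl, addCharsStepB, hca,
          Bool.false_eq_true, Bool.not_eq_true, if_false]
        rw [foldl_stepB_acc t (a :: t1) ([] ++ [c])]
        rw [ih (a :: t1) hw1]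
        simp

-- ===== VERDICT (by name: the statement is the Claim_ definition above) =====
theorem add_chars_draft_spec : Claim_equal_add_chars_draft := by
  intro w1 w2 _ hpre
  unfold Spec_add_chars_draft add_chars_draft add_chars_draft_alt
  rw [recA_eq_fold w2.toList w1.toList hpre]
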